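-- pv_equiv track=rewrite | github.com/datnim24/1_Thesis | Thesis_Code_export/q_learning/train.py | get_restock_actions
-- ===== SOURCE A (Python) =====
-- WAIT_ACTION = 16
--
-- RESTOCK_ACTION_BY_PAIR: dict[tuple[str, str], int] = {
--     ("L1", "PSC"): 9,
--     ("L1", "NDG"): 10,
--     ("L1", "BUSTA"): 11,
--     ("L2", "PSC"): 12,
-- }
--
-- RESTOCK_ACTION_ORDER = (
--     ("L1", "PSC"),
--     ("L1", "NDG"),
--     ("L1", "BUSTA"),
--     ("L2", "PSC"),
-- )
--
-- def get_restock_actions(params: dict) -> list[int]: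
--     feasible = {tuple(pair) for pair in params.get("feasible_gc_pairs", [])}
--     actions = [
--         RESTOCK_ACTION_BY_PAIR[pair]
--         for pair in RESTOCK_ACTION_ORDER
--         if pair in feasible
--     ]
--     actions.append(WAIT_ACTION)
--     return actions
-- ===== SOURCE B (Python) =====
-- WAIT_ACTION = 16
--
-- RESTOCK_ACTION_BY_PAIR: dict[tuple[str, str], int] = {
--     ("L1", "PSC"): 9,
--     ("L1", "NDG"): 10,
--     ("L1", "BUSTA"): 11,
--     ("L2", "PSC"): 12,
-- }
--
-- def get_restock_actions(params: dict) -> list[int]: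
--     seen = set()
--     codes = []
--     for pair in params.get("feasible_gc_pairs", []):
--         t = tuple(pair)
--         if t in seen:
--             continue
--         seen.add(t)
--         code = RESTOCK_ACTION_BY_PAIR.get(t)
--         if code is not None:
--             codes.append(code)
--     codes.sort()
--     codes.append(WAIT_ACTION)
--     return codes
-- ===== Notes on version B (the rewrite author's own statement) =====
-- stated objective: alternative
-- what changed: B makes one data-driven pass over the feasible-pairs list with a seen-set (dedup) and a dict lookup per new pair (skipping pairs with no action), then sorts the collected action codes ascending and appends WAIT_ACTION, replacing A's fixed-order scan over RESTOCK_ACTION_ORDER with membership tests against a prebuilt set; the results coincide because the action codes 9,10,11,12 increase along RESTOCK_ACTION_ORDER.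
import Mathlib
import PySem

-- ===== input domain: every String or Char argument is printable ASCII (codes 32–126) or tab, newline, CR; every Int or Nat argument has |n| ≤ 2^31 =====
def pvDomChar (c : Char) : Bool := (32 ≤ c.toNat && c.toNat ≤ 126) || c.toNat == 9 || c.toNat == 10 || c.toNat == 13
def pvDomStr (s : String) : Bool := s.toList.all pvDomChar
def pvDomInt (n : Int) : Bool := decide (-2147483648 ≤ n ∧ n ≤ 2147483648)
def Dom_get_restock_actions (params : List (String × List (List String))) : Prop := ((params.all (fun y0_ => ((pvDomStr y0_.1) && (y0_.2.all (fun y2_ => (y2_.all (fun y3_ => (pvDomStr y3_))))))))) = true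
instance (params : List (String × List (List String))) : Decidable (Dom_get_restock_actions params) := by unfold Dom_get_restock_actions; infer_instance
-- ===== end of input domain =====

-- B replaces A's fixed-order scan over RESTOCK_ACTION_ORDER with one data-driven pass over the
-- feasible list (seen-set dedup + dict lookup per new pair) followed by an ascending sort; same
-- return value, alternative decomposition (no speed claim).

-- ===== PORT A =====
-- module constant WAIT_ACTION = 16 is inlined; RESTOCK_ACTION_BY_PAIR / RESTOCK_ACTION_ORDER:
def pvRestockByPair : PySem.Dict (List String) Int :=
  PySem.Dict.mk [(["L1", "PSC"], 9), (["L1", "NDG"], 10), (["L1", "BUSTA"], 11), (["L2", "PSC"], 12)]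

def pvRestockOrder : List (List String) :=
  [["L1", "PSC"], ["L1", "NDG"], ["L1", "BUSTA"], ["L2", "PSC"]]

-- Python tuples-of-strings are represented as List String (tuple(pair) = identity on this rep).
-- RESTOCK_ACTION_BY_PAIR[pair] is total here (every pair of RESTOCK_ACTION_ORDER is a key), ported as getD.
def get_restock_actions (params : List (String × List (List String))) : List Int :=
  let feasible : PySem.Set (List String) :=
    PySem.Set.ofList (PySem.Dict.getD (PySem.Dict.ofList params) "feasible_gc_pairs" [])
  let actions : List Int :=
    (pvRestockOrder.filter (fun pair => PySem.Set.contains feasible pair)).map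
      (fun pair => PySem.Dict.getD pvRestockByPair pair 0)
  actions ++ [16]

-- ===== PORT B =====
-- one pass over the feasible list: seen-set dedup, dict lookup (skip missing), then sort, then wait action
def get_restock_actions_alt (params : List (String × List (List String))) : List Int :=
  let st :=
    (PySem.Dict.getD (PySem.Dict.ofList params) "feasible_gc_pairs" []).foldl
      (fun (st : PySem.Set (List String) × List Int) pair =>
        if PySem.Set.contains st.1 pair then st
        else (PySem.Set.add st.1 pair,
              match PySem.Dict.get? pvRestockByPair pair with
              | some code => st.2 ++ [code]
              | none => st.2))
      (PySem.Set.empty, [])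
  PySem.List.sorted st.2 (fun x => x) ++ [16]

-- ===== PRECONDITION & SPEC =====
def Spec_get_restock_actions (params : List (String × List (List String))) (out : List Int) : Prop := out = get_restock_actions_alt params
instance (params : List (String × List (List String))) (out : List Int) : Decidable (Spec_get_restock_actions params out) := by unfold Spec_get_restock_actions; infer_instance

-- ===== CLAIM (what is proved, stated in full; the proofs are below) =====
def Claim_equal_get_restock_actions : Prop := ∀ (params : List (String × List (List String))), Dom_get_restock_actions params → Spec_get_restock_actions params (get_restock_actions params)

-- ===== LEMMAS AND PROOFS =====

-- the lookup function of both ports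
def pvLook (p : List String) : Option Int := PySem.Dict.get? pvRestockByPair p

-- B's fold keeps the invariant: collected codes = filterMap of the seen set through the dict
lemma pvFoldB_spec (lst : List (List String)) (s : PySem.Set (List String)) :
    lst.foldl
      (fun (st : PySem.Set (List String) × List Int) pair =>
        if PySem.Set.contains st.1 pair then st
        else (PySem.Set.add st.1 pair,
              match PySem.Dict.get? pvRestockByPair pair with
              | some code => st.2 ++ [code]
              | none => st.2))
      (s, s.filterMap pvLook)
    = (PySem.Set.update s lst, (PySem.Set.update s lst).filterMap pvLook) := by
  induction lst generalizing s with
  | nil => simp [PySem.Set.update]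
  | cons p rest ih =>
    have hstep :
        (if PySem.Set.contains s p then (s, List.filterMap pvLook s)
         else (PySem.Set.add s p,
            match PySem.Dict.get? pvRestockByPair p with
            | some code => List.filterMap pvLook s ++ [code]
            | none => List.filterMap pvLook s))
        = (PySem.Set.add s p, (PySem.Set.add s p).filterMap pvLook) := by
      by_cases h : PySem.Set.contains s p = true
      · have hadd : PySem.Set.add s p = s := by unfold PySem.Set.add; rw [if_pos h]
        rw [if_pos h, hadd]
      · have hadd : PySem.Set.add s p = s ++ [p] := by unfold PySem.Set.add; rw [if_neg h]
        rw [if_neg h, hadd, List.filterMap_append]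
        cases hl : PySem.Dict.get? pvRestockByPair p <;> simp [pvLook, hl]
    rw [List.foldl_cons, hstep]
    simpa [PySem.Set.update, List.foldl_cons] using ih (PySem.Set.add s p)

-- pvLook is injective where defined (the four action codes are distinct)
lemma pvLook_inj (a a' : List String) (b : Int) (ha : b ∈ pvLook a) (ha' : b ∈ pvLook a') : a = a' := by
  simp only [pvLook, pvRestockByPair, PySem.Dict.get?_mk_cons] at ha ha'
  split_ifs at ha ha' <;> simp_all [PySem.Dict.get?] <;> omega

-- main bridge: sorting B's collected codes yields A's ordered scan result
lemma pvSorted_eq (S : PySem.Set (List String)) (hnd : List.Nodup S) :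
    PySem.List.sorted (S.filterMap pvLook) (fun x => x)
      = (pvRestockOrder.filter (fun p => PySem.Set.contains S p)).map
          (fun p => PySem.Dict.getD pvRestockByPair p 0) := by
  have hfilter : pvRestockOrder.filter (fun p => PySem.Set.contains S p)
      = pvRestockOrder.filter (fun p => decide (p ∈ S)) := by
    apply List.filter_congr; intro p _; simp
  rw [hfilter]
  apply PySem.List.sorted_eq_of_perm_of_pairwise_lt
  · -- permutation, via nodup + same membership
    rw [List.perm_ext_iff_of_nodup ?nd1 (hnd.filterMap pvLook_inj)]
    case nd1 =>
      by_cases m1 : ["L1", "PSC"] ∈ S <;> by_cases m2 : ["L1", "NDG"] ∈ S <;>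
        by_cases m3 : ["L1", "BUSTA"] ∈ S <;> by_cases m4 : ["L2", "PSC"] ∈ S <;>
        simp [pvRestockOrder, List.filter, m1, m2, m3, m4] <;> decide
    intro c
    simp only [List.mem_filterMap, List.mem_map, List.mem_filter, decide_eq_true_eq]
    constructor
    · rintro ⟨p, ⟨hpo, hpS⟩, rfl⟩
      have hkey : p = ["L1", "PSC"] ∨ p = ["L1", "NDG"] ∨ p = ["L1", "BUSTA"] ∨ p = ["L2", "PSC"] := by
        simpa [pvRestockOrder] using hpo
      rcases hkey with rfl | rfl | rfl | rfl <;> exact ⟨_, hpS, by decide⟩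
    · rintro ⟨p, hpS, heq⟩
      have hkey : (p = ["L1", "PSC"] ∧ c = 9) ∨ (p = ["L1", "NDG"] ∧ c = 10) ∨
          (p = ["L1", "BUSTA"] ∧ c = 11) ∨ (p = ["L2", "PSC"] ∧ c = 12) := by
        simp only [pvLook, pvRestockByPair, PySem.Dict.get?_mk_cons] at heq
        split_ifs at heq <;> simp_all [PySem.Dict.get?]
      rcases hkey with ⟨rfl, rfl⟩ | ⟨rfl, rfl⟩ | ⟨rfl, rfl⟩ | ⟨rfl, rfl⟩ <;>
        exact ⟨_, ⟨by decide, hpS⟩, by decide⟩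
  · -- the ordered scan result is strictly increasing
    by_cases m1 : ["L1", "PSC"] ∈ S <;> by_cases m2 : ["L1", "NDG"] ∈ S <;>
      by_cases m3 : ["L1", "BUSTA"] ∈ S <;> by_cases m4 : ["L2", "PSC"] ∈ S <;>
      simp [pvRestockOrder, List.filter, m1, m2, m3, m4] <;> decide

-- ===== VERDICT (by name: the statement is the Claim_ definition above) =====
theorem get_restock_actions_spec : Claim_equal_get_restock_actions := by
  intro params _
  unfold Spec_get_restock_actions
  have h := pvFoldB_spec (PySem.Dict.getD (PySem.Dict.ofList params) "feasible_gc_pairs" []) PySem.Set.empty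
  rw [show List.filterMap pvLook (PySem.Set.empty : PySem.Set (List String)) = [] from rfl] at h
  rw [show PySem.Set.update (PySem.Set.empty : PySem.Set (List String))
        (PySem.Dict.getD (PySem.Dict.ofList params) "feasible_gc_pairs" [])
      = PySem.Set.ofList (PySem.Dict.getD (PySem.Dict.ofList params) "feasible_gc_pairs" []) from rfl] at h
  simp only [get_restock_actions, get_restock_actions_alt]
  rw [h]
  exact congrArg (· ++ [16]) (pvSorted_eq _ (PySem.Set.nodup_ofList _)).symm
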